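-- pv_equiv track=rewrite | github.com/TechmanStudios/sol | _tools/generate_full_reports.py | _first_nonempty_heading
-- ===== SOURCE A (Python) =====
-- from typing import Iterable, Sequence
--
-- def _first_nonempty_heading(lines: Sequence[str]) -> str:
--     for ln in lines:
--         s = ln.strip()
--         if not s:
--             continue
--         if s.startswith("#"):
--             return s
--     # fallback: first non-empty line
--     for ln in lines:
--         s = ln.strip()
--         if s:
--             return s[:160]
--     return "(empty)"
-- ===== SOURCE B (Python) =====
-- def _first_nonempty_heading(lines):
--     first_nonempty = None
--     for ln in lines:
--         s = ln.strip()
--         if not s: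
--             continue
--         if s.startswith("#"):
--             return s
--         if first_nonempty is None:
--             first_nonempty = s
--     return first_nonempty[:160] if first_nonempty is not None else "(empty)"
-- ===== Notes on version B (the rewrite author's own statement) =====
-- stated objective: simpler
-- what changed: Replaces A's two full scans (heading scan, then a second scan for the first nonempty fallback) with a single pass that remembers the first nonempty line while searching for a heading.
import Mathlib
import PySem

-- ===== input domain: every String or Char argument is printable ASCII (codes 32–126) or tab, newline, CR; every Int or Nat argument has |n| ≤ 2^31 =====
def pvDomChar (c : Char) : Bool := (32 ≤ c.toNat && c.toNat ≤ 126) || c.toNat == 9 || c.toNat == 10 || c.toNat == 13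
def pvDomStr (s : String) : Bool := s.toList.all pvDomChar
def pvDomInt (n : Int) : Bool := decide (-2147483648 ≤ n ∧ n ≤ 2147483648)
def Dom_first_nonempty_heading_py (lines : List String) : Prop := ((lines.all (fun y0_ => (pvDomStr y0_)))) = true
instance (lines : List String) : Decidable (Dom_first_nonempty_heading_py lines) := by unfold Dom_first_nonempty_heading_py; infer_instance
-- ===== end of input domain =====

-- B: single pass remembering the first nonempty line instead of A's two scans.


-- ===== PORT A =====
-- first loop: return the first stripped heading, none if no heading
def fnhA_head : List String → Option String
  | [] => none
  | ln :: rest =>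
    let s := PySem.Str.strip ln
    if s = "" then fnhA_head rest
    else if PySem.Str.startswith s "#" then some s
    else fnhA_head rest

-- second loop: first nonempty stripped line truncated to 160, else "(empty)"
def fnhA_fallback : List String → String
  | [] => "(empty)"
  | ln :: rest =>
    let s := PySem.Str.strip ln
    if s ≠ "" then PySem.Str.slice s none (some 160)
    else fnhA_fallback rest

def first_nonempty_heading_py (lines : List String) : String :=
  match fnhA_head lines with
  | some s => s
  | none => fnhA_fallback lines

-- ===== PORT B =====
-- single pass; acc is the first nonempty line seen so far (None at start)
def fnhB_loop : List String → Option String → String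
  | [], acc =>
    match acc with
    | some a => PySem.Str.slice a none (some 160)
    | none => "(empty)"
  | ln :: rest, acc =>
    let s := PySem.Str.strip ln
    if s = "" then fnhB_loop rest acc
    else if PySem.Str.startswith s "#" then s
    else fnhB_loop rest (if acc.isNone then some s else acc)

def first_nonempty_heading_py_alt (lines : List String) : String :=
  fnhB_loop lines none

-- ===== PRECONDITION & SPEC =====
def Spec_first_nonempty_heading_py (lines : List String) (out : String) : Prop := out = first_nonempty_heading_py_alt lines
instance (lines : List String) (out : String) : Decidable (Spec_first_nonempty_heading_py lines out) := by unfold Spec_first_nonempty_heading_py; infer_instance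

-- ===== CLAIM (what is proved, stated in full; the proofs are below) =====
def Claim_equal_first_nonempty_heading_py : Prop := ∀ (lines : List String), Dom_first_nonempty_heading_py lines → Spec_first_nonempty_heading_py lines (first_nonempty_heading_py lines)

-- ===== LEMMAS AND PROOFS =====
-- Invariant of B's loop: if a heading exists it is returned; otherwise the
-- fallback is acc (truncated) when acc is set, else A's second-loop result.
theorem fnhB_loop_eq (lines : List String) : ∀ (acc : Option String),
    fnhB_loop lines acc =
      match fnhA_head lines with
      | some s => s
      | none =>
        match acc with
        | some a => PySem.Str.slice a none (some 160)
        | none => fnhA_fallback lines := by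
  induction lines with
  | nil => intro acc; cases acc <;> rfl
  | cons ln rest ih =>
    intro acc
    simp only [fnhB_loop, fnhA_head, fnhA_fallback]
    by_cases hs : PySem.Str.strip ln = ""
    · simp [hs, ih]
    · by_cases hh : PySem.Chars.startswith (PySem.Chars.strip ln.toList) ['#'] = true
      · simp [hs, hh]
      · cases acc <;> simp [hs, hh, ih]

-- ===== VERDICT (by name: the statement is the Claim_ definition above) =====
theorem first_nonempty_heading_py_spec : Claim_equal_first_nonempty_heading_py := by
  intro lines _
  unfold Spec_first_nonempty_heading_py first_nonempty_heading_py first_nonempty_heading_py_alt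
  rw [fnhB_loop_eq]
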